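-- pv_equiv track=rewrite | github.com/gnsals0904/CodingTestPrep | Ecote/searching02.py | binary_search_test
-- ===== SOURCE A (Python) =====
-- def binary_search_test(array, target, start, end):
--     if start > end:
--         return None
--     mid = (start + end) // 2
--     result = 0
--     for x in array:
--         if x > mid:
--             result = result + x - mid
--     if result == target:
--         return mid
--     if result < target:
--         return binary_search_test(array, target, start, mid - 1)
--     else:
--         return binary_search_test(array, target, mid + 1, end)
-- ===== SOURCE B (Python) =====
-- def binary_search_test(array, target, start, end):
--     # Sort once, precompute suffix sums; each probe's excess sum is then a
--     # hand-written bisect plus one suffix-sum lookup instead of a scan of array.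
--     s = sorted(array)
--     n = len(s)
--     rev = [0]
--     run = 0
--     for v in reversed(s):
--         run = run + v
--         rev.append(run)
--     suf = rev[::-1]          # suf[k] == sum(s[k:])
--
--     def cnt_le(lo, hi, x):   # number of elements of s that are <= x
--         if lo >= hi:
--             return lo
--         m = (lo + hi) // 2
--         if s[m] <= x:
--             return cnt_le(m + 1, hi, x)
--         return cnt_le(lo, m, x)
--
--     while start <= end:
--         mid = (start + end) // 2
--         k = cnt_le(0, n, mid)
--         result = suf[k] - (n - k) * mid
--         if result == target:
--             return mid
--         if result < target:
--             end = mid - 1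
--         else:
--             start = mid + 1
--     return None
-- ===== Notes on version B (the rewrite author's own statement) =====
-- stated objective: alternative
-- what changed: B sorts the array once and precomputes suffix sums, then answers each bisection probe's excess-sum by a hand-written binary search plus a suffix-sum lookup instead of A's full scan of the array, and replaces A's recursion over (start, end) by an iterative while-loop.
import Mathlib
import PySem

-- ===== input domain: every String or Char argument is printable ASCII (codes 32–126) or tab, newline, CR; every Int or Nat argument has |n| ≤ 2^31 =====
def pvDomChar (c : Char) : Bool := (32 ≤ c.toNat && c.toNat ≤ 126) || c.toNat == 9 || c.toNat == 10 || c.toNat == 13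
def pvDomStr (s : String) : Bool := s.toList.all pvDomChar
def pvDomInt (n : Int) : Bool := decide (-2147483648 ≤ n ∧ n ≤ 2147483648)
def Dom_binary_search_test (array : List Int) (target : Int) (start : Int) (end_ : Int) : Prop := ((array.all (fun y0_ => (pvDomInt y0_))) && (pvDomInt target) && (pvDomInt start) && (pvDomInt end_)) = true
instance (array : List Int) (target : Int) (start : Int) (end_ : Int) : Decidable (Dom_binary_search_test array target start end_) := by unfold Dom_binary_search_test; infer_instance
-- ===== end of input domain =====

-- B: alternative algorithm — sort once + suffix sums, each probe's excess-sum answered by a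
-- hand-written bisect and a suffix-sum lookup instead of A's scan; same return value everywhere.

-- ===== PORT A =====
-- The recursion consumes one unit of fuel per call; fuel = interval length + 1 strictly
-- dominates the recursion depth (the interval shrinks every call), so the 0-fuel branch is
-- never reached: a totality guard only, the computation is A's.
def binary_search_test_go (array : List Int) (target : Int) (fuel : Nat) (start : Int) (end_ : Int) : Option Int :=
  match fuel with
  | 0 => none
  | Nat.succ fuel =>
    if start > end_ then none
    else
      let mid := PySem.Int.floordiv (start + end_) 2
      let result := array.foldl (fun acc x => if x > mid then acc + x - mid else acc) 0
      if result = target then some mid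
      else if result < target then binary_search_test_go array target fuel start (mid - 1)
      else binary_search_test_go array target fuel (mid + 1) end_

def binary_search_test (array : List Int) (target : Int) (start : Int) (end_ : Int) : Option Int :=
  binary_search_test_go array target ((end_ - start + 1).toNat + 1) start end_

-- ===== PORT B =====
-- Source B's inner `cnt_le(lo, hi, x)` (s is the sorted list it closes over); fuel = interval
-- length + 1 is a totality guard only (the interval halves each call, so 0 fuel is never hit);
-- `s[m]` is ported with pyGetD: every call B makes keeps 0 ≤ m < len s, where pyGetD is exact.
def pvCntLeGo (s : List Int) (fuel : Nat) (lo : Int) (hi : Int) (x : Int) : Int :=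
  match fuel with
  | 0 => lo
  | Nat.succ fuel =>
    if lo ≥ hi then lo
    else
      let m := PySem.Int.floordiv (lo + hi) 2
      if PySem.List.pyGetD s m 0 ≤ x then pvCntLeGo s fuel (m + 1) hi x
      else pvCntLeGo s fuel lo m x

-- Source B's while-loop over (start, end), same fuel guard as A's recursion;
-- `suf[k]` ported with pyGetD (B keeps 0 ≤ k ≤ n = len suf - 1).
def pvLoopGo (s : List Int) (suf : List Int) (n : Int) (target : Int) (fuel : Nat) (start : Int) (end_ : Int) : Option Int :=
  match fuel with
  | 0 => none
  | Nat.succ fuel =>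
    if start ≤ end_ then
      let mid := PySem.Int.floordiv (start + end_) 2
      let k := pvCntLeGo s ((n - 0).toNat + 1) 0 n mid
      let result := PySem.List.pyGetD suf k 0 - (n - k) * mid
      if result = target then some mid
      else if result < target then pvLoopGo s suf n target fuel start (mid - 1)
      else pvLoopGo s suf n target fuel (mid + 1) end_
    else none

def binary_search_test_alt (array : List Int) (target : Int) (start : Int) (end_ : Int) : Option Int :=
  let s := PySem.List.sorted array (fun x => x) false
  -- the (rev, run) building loop of Source B: two accumulators, folded as a pair
  let rev := (s.reverse.foldl (fun (st : List Int × Int) v => (st.1 ++ [st.2 + v], st.2 + v)) ([0], 0)).1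
  let suf := rev.reverse   -- rev[::-1] (xs[::-1] is xs.reverse: PySem.List.slice?_none_none_neg_one)
  pvLoopGo s suf (s.length : Int) target ((end_ - start + 1).toNat + 1) start end_

-- ===== PRECONDITION & SPEC =====
def Spec_binary_search_test (array : List Int) (target : Int) (start : Int) (end_ : Int) (out : Option Int) : Prop := out = binary_search_test_alt array target start end_
instance (array : List Int) (target : Int) (start : Int) (end_ : Int) (out : Option Int) : Decidable (Spec_binary_search_test array target start end_ out) := by unfold Spec_binary_search_test; infer_instance

-- ===== CLAIM (what is proved, stated in full; the proofs are below) =====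
def Claim_equal_binary_search_test : Prop := ∀ (array : List Int) (target : Int) (start : Int) (end_ : Int), Dom_binary_search_test array target start end_ → Spec_binary_search_test array target start end_ (binary_search_test array target start end_)

-- ===== LEMMAS AND PROOFS =====

-- abbreviations (proof-side only) for the values binary_search_test_alt builds
def pvS (array : List Int) : List Int := PySem.List.sorted array (fun x => x) false
def pvSuf (array : List Int) : List Int :=
  ((pvS array).reverse.foldl (fun (st : List Int × Int) v => (st.1 ++ [st.2 + v], st.2 + v)) ([0], 0)).1.reverse

theorem pvS_pairwise (array : List Int) : (pvS array).Pairwise (· ≤ ·) := by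
  simpa [pvS] using PySem.List.sorted_pairwise (κ := Int) array (fun x => x)

theorem pvS_perm (array : List Int) : (pvS array).Perm array :=
  PySem.List.sorted_perm array (fun x => x) false

-- every element of dropWhile (· ≤ mid) of a sorted list exceeds mid
theorem dropWhile_all_gt (s : List Int) (mid : Int) (hs : s.Pairwise (· ≤ ·)) :
    ∀ x ∈ s.dropWhile (fun v => decide (v ≤ mid)), mid < x := by
  cases hdw : s.dropWhile (fun v => decide (v ≤ mid)) with
  | nil => simp
  | cons y t =>
    have hy : ¬ (y ≤ mid) := by
      have h := List.head?_dropWhile_not (fun v => decide (v ≤ mid)) s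
      rw [hdw] at h
      simpa using h
    have hpw : (y :: t).Pairwise (fun a b : Int => a ≤ b) := by
      rw [← hdw]; exact hs.sublist (List.dropWhile_sublist _)
    intro x hx
    rcases List.mem_cons.1 hx with rfl | hx
    · omega
    · have := (List.pairwise_cons.1 hpw).1 x hx
      omega

theorem filter_gt_eq_dropWhile (s : List Int) (mid : Int) (hs : s.Pairwise (· ≤ ·)) :
    s.filter (fun x => decide (mid < x)) = s.dropWhile (fun v => decide (v ≤ mid)) := by
  conv_lhs => rw [← List.takeWhile_append_dropWhile (p := fun v => decide (v ≤ mid)) (l := s)]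
  rw [List.filter_append]
  have h1 : (s.takeWhile (fun v => decide (v ≤ mid))).filter (fun x => decide (mid < x)) = [] := by
    refine List.filter_eq_nil_iff.2 (fun a ha => ?_)
    have := List.mem_takeWhile_imp ha
    simp at this ⊢
    omega
  have h2 : (s.dropWhile (fun v => decide (v ≤ mid))).filter (fun x => decide (mid < x))
      = s.dropWhile (fun v => decide (v ≤ mid)) := by
    refine List.filter_eq_self.2 (fun a ha => ?_)
    have := dropWhile_all_gt s mid hs a ha
    simpa using this
  rw [h1, h2, List.nil_append]

theorem drop_tw_eq_dropWhile (s : List Int) (p : Int → Bool) :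
    s.drop (s.takeWhile p).length = s.dropWhile p := by
  have h := List.takeWhile_append_dropWhile (p := p) (l := s)
  have h2 : (s.takeWhile p ++ s.dropWhile p).drop (s.takeWhile p).length = s.dropWhile p :=
    List.drop_left
  rw [h] at h2
  exact h2

theorem tw_length_le (s : List Int) (p : Int → Bool) : (s.takeWhile p).length ≤ s.length :=
  (List.takeWhile_prefix p).length_le

-- index characterisation of the takeWhile length on a sorted list
theorem getElem_le_iff_lt_tw (s : List Int) (mid : Int) (hs : s.Pairwise (· ≤ ·))
    (j : Nat) (hj : j < s.length) :
    s[j] ≤ mid ↔ j < (s.takeWhile (fun v => decide (v ≤ mid))).length := by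
  set p := fun v : Int => decide (v ≤ mid) with hp
  constructor
  · intro h
    by_contra hK
    have hK' : (s.takeWhile p).length ≤ j := by omega
    have hmem : s[j] ∈ s.dropWhile p := by
      rw [← drop_tw_eq_dropWhile s p]
      have he : s[j] = (s.drop (s.takeWhile p).length)[j - (s.takeWhile p).length]'(by
          simp [List.length_drop]; omega) := by
        rw [List.getElem_drop]
        congr 1
        omega
      rw [he]
      exact List.getElem_mem _
    have := dropWhile_all_gt s mid hs _ hmem
    omega
  · intro h
    have hpre : s.takeWhile p <+: s := List.takeWhile_prefix p
    have hg : (s.takeWhile p)[j]'h = s[j] := hpre.getElem h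
    have hmem : (s.takeWhile p)[j]'h ∈ s.takeWhile p := List.getElem_mem _
    have := List.mem_takeWhile_imp hmem
    rw [hg] at this
    simpa [hp] using this

-- correctness of Source B's hand-written bisect on a sorted list (any sufficient fuel)
theorem pvCntLeGo_eq (s : List Int) (mid : Int) (hs : s.Pairwise (· ≤ ·))
    (fuel : Nat) (lo hi : Int) (hf : (hi - lo).toNat < fuel)
    (h0 : 0 ≤ lo) (h1 : hi ≤ (s.length : Int))
    (h2 : lo ≤ ((s.takeWhile (fun v => decide (v ≤ mid))).length : Int))
    (h3 : ((s.takeWhile (fun v => decide (v ≤ mid))).length : Int) ≤ hi) :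
    pvCntLeGo s fuel lo hi mid = ((s.takeWhile (fun v => decide (v ≤ mid))).length : Int) := by
  induction fuel generalizing lo hi with
  | zero => omega
  | succ fuel ih =>
    rw [pvCntLeGo]
    by_cases hlh : lo ≥ hi
    · simp only [hlh, if_true]
      omega
    · simp only [hlh, if_false]
      have hm1 : lo ≤ PySem.Int.floordiv (lo + hi) 2 :=
        (PySem.Int.le_floordiv_iff_mul_le (by omega)).2 (by omega)
      have hm2 : PySem.Int.floordiv (lo + hi) 2 < hi :=
        (PySem.Int.floordiv_lt_iff_lt_mul (by omega)).2 (by omega)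
      rw [PySem.List.pyGetD_eq_getElem s 0 (by omega) (by omega)]
      by_cases hv : s[(PySem.Int.floordiv (lo + hi) 2).toNat]'(by omega) ≤ mid
      · rw [if_pos hv]
        have hlt := (getElem_le_iff_lt_tw s mid hs _ (by omega)).1 hv
        exact ih (PySem.Int.floordiv (lo + hi) 2 + 1) hi (by omega) (by omega) h1 (by omega) h3
      · rw [if_neg hv]
        have hge : ¬ ((PySem.Int.floordiv (lo + hi) 2).toNat
            < (s.takeWhile (fun v => decide (v ≤ mid))).length) := by
          intro hlt
          exact hv ((getElem_le_iff_lt_tw s mid hs _ (by omega)).2 hlt)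
        exact ih lo (PySem.Int.floordiv (lo + hi) 2) (by omega) h0 (by omega) h2 (by omega)

-- the (rev, run) loop builds the list of prefix sums
theorem foldl_prefix (t : List Int) : ∀ (l : List Int) (r : Int),
    t.foldl (fun st v => (st.1 ++ [st.2 + v], st.2 + v)) (l, r)
      = (l ++ (List.range t.length).map (fun i => r + (t.take (i + 1)).sum), r + t.sum) := by
  induction t using List.reverseRecOn with
  | nil => intro l r; simp
  | append_singleton t v ih =>
    intro l r
    rw [List.foldl_append, ih]
    simp only [List.foldl_cons, List.foldl_nil]
    refine Prod.ext ?_ ?_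
    · simp only [List.length_append, List.length_singleton, List.range_succ, List.map_append,
        List.map_cons, List.map_nil]
      rw [List.append_assoc]
      congr 1
      congr 1
      · refine List.map_congr_left (fun i hi => ?_)
        have hi' : i < t.length := by simpa using hi
        rw [List.take_append_of_le_length (by omega)]
      · have ht : (t ++ [v]).take (t.length + 1) = t ++ [v] := List.take_of_length_le (by simp)
        rw [ht]
        simp only [List.sum_append, List.sum_cons, List.sum_nil, List.cons.injEq, and_true]
        omega
    · simp [List.sum_append]
      ring

-- the suffix-sum list Source B builds, in closed form
theorem pvSuf_eq (array : List Int) :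
    pvSuf array = (List.range ((pvS array).length + 1)).map (fun k => ((pvS array).drop k).sum) := by
  unfold pvSuf
  rw [foldl_prefix]
  dsimp only
  have hrw : ([0] ++ (List.range (pvS array).reverse.length).map
        (fun i => 0 + (((pvS array).reverse.take (i + 1)).sum)))
      = (List.range ((pvS array).length + 1)).map
        (fun i => ((pvS array).reverse.take i).sum) := by
    rw [List.length_reverse, List.range_succ_eq_map, List.map_cons, List.map_map]
    simp [Function.comp]
  rw [hrw]
  refine List.ext_getElem (by simp) (fun i h1 h2 => ?_)
  rw [List.getElem_reverse, List.getElem_map, List.getElem_range, List.getElem_map,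
    List.getElem_range]
  have hi : i < (pvS array).length + 1 := by simpa using h2
  have hlen : ((List.range ((pvS array).length + 1)).map
      (fun i => ((pvS array).reverse.take i).sum)).length = (pvS array).length + 1 := by simp
  rw [List.take_reverse]
  have hd : (pvS array).length - ((pvS array).length + 1 - 1 - i) = i := by
    simp at h2 ⊢
    omega
  rw [show ((List.range ((pvS array).length + 1)).map
      (fun i => ((pvS array).reverse.take i).sum)).length - 1 - i
      = (pvS array).length + 1 - 1 - i from by rw [hlen]]
  rw [hd]
  exact List.sum_reverse _

theorem pvSuf_getD (array : List Int) (k : Int) (h0 : 0 ≤ k) (h1 : k ≤ ((pvS array).length : Int)) :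
    PySem.List.pyGetD (pvSuf array) k 0 = ((pvS array).drop k.toNat).sum := by
  rw [pvSuf_eq]
  rw [PySem.List.pyGetD_eq_getElem _ 0 h0 (by simp; omega)]
  rw [List.getElem_map, List.getElem_range]

-- per-probe equality: A's excess-sum scan = B's suffix-sum/bisect formula
theorem step_eq (array : List Int) (mid : Int) :
    array.foldl (fun acc x => if x > mid then acc + x - mid else acc) 0
      = PySem.List.pyGetD (pvSuf array)
          (pvCntLeGo (pvS array) (((((pvS array).length : Int) - 0).toNat) + 1) 0 ((pvS array).length : Int) mid) 0
        - (((pvS array).length : Int)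
            - pvCntLeGo (pvS array) (((((pvS array).length : Int) - 0).toNat) + 1) 0 ((pvS array).length : Int) mid) * mid := by
  have hs := pvS_pairwise array
  set s := pvS array with hsdef
  set K := (s.takeWhile (fun v => decide (v ≤ mid))).length with hKdef
  have hKle : K ≤ s.length := tw_length_le s _
  have hK : pvCntLeGo s ((((s.length : Int) - 0).toNat) + 1) 0 (s.length : Int) mid = (K : Int) :=
    pvCntLeGo_eq s mid hs _ 0 (s.length : Int) (by omega) le_rfl le_rfl
      (by positivity) (by exact_mod_cast hKle)
  rw [hK]
  have hsuf : PySem.List.pyGetD (pvSuf array) (K : Int) 0 = (s.drop K).sum := by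
    have := pvSuf_getD array (K : Int) (by positivity) (by exact_mod_cast hKle)
    simpa [hsdef] using this
  rw [hsuf]
  -- left side: rewrite A's loop as a filter-sum
  have e1 : array.foldl (fun acc x => if x > mid then acc + x - mid else acc) 0
      = array.foldl (fun acc x => if mid < x then acc + (x - mid) else acc) 0 := by
    refine PySem.List.foldl_congr_mem array _ _ 0 (fun acc x _ => ?_)
    simp only [gt_iff_lt]
    split_ifs with hc
    · ring
    · rfl
  have e2 : array.foldl (fun acc x => if mid < x then acc + (x - mid) else acc) 0
      = (array.filter (fun x => decide (mid < x))).foldl (fun acc x => acc + (x - mid)) 0 :=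
    PySem.List.foldl_ite_eq_foldl_filter (fun x => mid < x) (fun acc x => acc + (x - mid)) array 0
  have e3 : (array.filter (fun x => decide (mid < x))).foldl (fun acc x => acc + (x - mid)) 0
      = 0 + ((array.filter (fun x => decide (mid < x))).map (fun x => x - mid)).sum :=
    PySem.List.foldl_add _ _ 0
  have e4 : ((array.filter (fun x => decide (mid < x))).map (fun x => x - mid)).sum
      = (array.filter (fun x => decide (mid < x))).sum
        - ((array.filter (fun x => decide (mid < x))).length : Int) * mid := by
    have h := PySem.List.sum_map_add_int (array.filter (fun x => decide (mid < x)))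
      (fun x => x) (fun _ => -mid)
    have h2 := PySem.List.sum_map_const_int (array.filter (fun x => decide (mid < x))) (-mid)
    simp only [sub_eq_add_neg]
    rw [h, h2]
    simp [List.map_id']
  -- move from array's filter to the sorted list's filter, then to drop K
  have hperm : (s.filter (fun x => decide (mid < x))).Perm (array.filter (fun x => decide (mid < x))) :=
    (pvS_perm array).filter _
  have hfe : s.filter (fun x => decide (mid < x)) = s.drop K := by
    rw [filter_gt_eq_dropWhile s mid hs, hKdef, drop_tw_eq_dropWhile]
  have hsum : (array.filter (fun x => decide (mid < x))).sum = (s.drop K).sum := by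
    rw [← hperm.sum_eq, hfe]
  have hlen : ((array.filter (fun x => decide (mid < x))).length : Int) = (s.length : Int) - (K : Int) := by
    rw [← hperm.length_eq, hfe]
    simp [List.length_drop]
    omega
  rw [e1, e2, e3, e4, hsum, hlen]
  ring

-- the two searches walk the same (start, end) intervals (any sufficient fuel)
theorem loop_eq (array : List Int) (target : Int) (fuel : Nat) (start end_ : Int)
    (hf : (end_ - start + 1).toNat < fuel) :
    binary_search_test_go array target fuel start end_
      = pvLoopGo (pvS array) (pvSuf array) (((pvS array).length : Nat) : Int) target fuel start end_ := by
  induction fuel generalizing start end_ with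
  | zero => omega
  | succ fuel ih =>
    rw [binary_search_test_go, pvLoopGo]
    by_cases h : start > end_
    · have h' : ¬ (start ≤ end_) := by omega
      simp only [h, if_true, h', if_false]
    · have hle : start ≤ end_ := by omega
      simp only [h, if_false, hle, if_true]
      rw [step_eq array (PySem.Int.floordiv (start + end_) 2)]
      have hb := PySem.Int.floordiv_two_mid_bounds (lo := start) (hi := end_) hle
      split_ifs with h1 h2
      · rfl
      · exact ih start (PySem.Int.floordiv (start + end_) 2 - 1) (by omega)
      · exact ih (PySem.Int.floordiv (start + end_) 2 + 1) end_ (by omega)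

-- ===== VERDICT (by name: the statement is the Claim_ definition above) =====
theorem binary_search_test_spec : Claim_equal_binary_search_test := by
  intro array target start end_ _
  unfold Spec_binary_search_test
  have halt : binary_search_test_alt array target start end_
      = pvLoopGo (pvS array) (pvSuf array) (((pvS array).length : Nat) : Int) target
          ((end_ - start + 1).toNat + 1) start end_ := rfl
  exact (loop_eq array target ((end_ - start + 1).toNat + 1) start end_ (by omega)).trans halt.symm
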